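-- pv_equiv track=rewrite | github.com/ayush-sharma-umass/cvpr-2024 | src/utils.py | count_papers_with_all_keys
-- ===== SOURCE A (Python) =====
-- def count_papers_with_all_keys(keys_to_paper_map: dict, keys: list):
--     """"
--     :param keys_to_paper_map: dict
--     key_to_paper_map is a dict such that
--     {
--         tag1:
--             {
--                 'org1': ['title1', 'title2' ... ],
--                 'org2': ['title1', 'title2' ... ],
--             },
--         tag2:
--             {
--                 'org1': ['title1', 'title2' ... ],
--                 'org3': ['title1', 'title2' ... ],
--             },
--         ...
--     }
--     OR
--     {
--         org1:
--             {
--                 'tag1': ['title1', 'title2' ... ],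
--                 'tag2': ['title1', 'title2' ... ],
--             },
--         org1:
--             {
--                 'tag1': ['title1', 'title2' ... ],
--                 'tag2': ['title1', 'title2' ... ],
--             },
--         ...
--     }
--     :param keys: list
--     keys can be alist of tags or a list of organizations
--     :returns a dict such that
--     { [all keys in the list]:
--         {
--             'org1': 2,
--             'org2': 3,
--         },
--     }
--
--     OR
--
--      { [all keys in the list]:
--         {
--             'tag1': 2,
--             'tag2': 3,
--         },
--     }
--     """
--     paper_counts = {}
--
--     # Get the list of organizations for the first tag
--     if keys:
--         first_key = keys[0]
--         subkeys_for_first_key = keys_to_paper_map.get(first_key, {})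
--
--         # Iterate over the organizations and their papers for the first tag
--         for subkey, papers in subkeys_for_first_key.items():
--             # Initialize a set of papers for intersection
--             intersected_papers = set(papers)
--
--             # Intersect with papers of the remkeying tags
--             for key in keys[1:]:
--                 subkeys_for_first_key = keys_to_paper_map.get(key, {}).get(subkey, [])
--                 intersected_papers.intersection_update(subkeys_for_first_key)
--
--             # Count the intersected papers
--             paper_count = len(intersected_papers)
--             if paper_count > 0:
--                 paper_counts[subkey] = paper_count
--     return paper_counts
-- ===== SOURCE B (Python) =====
-- def count_papers_with_all_keys(keys_to_paper_map: dict, keys: list):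
--     if not keys:
--         return {}
--     later = [keys_to_paper_map.get(k, {}) for k in keys[1:]]
--
--     def survivors(subkey, papers):
--         # a distinct paper counts iff every later key also lists it under subkey
--         return sum(1 for p in set(papers) if all(p in m.get(subkey, []) for m in later))
--
--     counts = ((sk, survivors(sk, papers))
--               for sk, papers in keys_to_paper_map.get(keys[0], {}).items())
--     return {sk: c for sk, c in counts if c > 0}
-- ===== Notes on version B (the rewrite author's own statement) =====
-- stated objective: alternative
-- what changed: A maintains a mutable set per subkey and shrinks it with intersection_update across the later keys; B precomputes the later subdicts once, counts the distinct candidate papers that pass a membership test over all later keys, and assembles the result with a filtering dict comprehension instead of conditional dict insertion.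
import Mathlib
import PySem

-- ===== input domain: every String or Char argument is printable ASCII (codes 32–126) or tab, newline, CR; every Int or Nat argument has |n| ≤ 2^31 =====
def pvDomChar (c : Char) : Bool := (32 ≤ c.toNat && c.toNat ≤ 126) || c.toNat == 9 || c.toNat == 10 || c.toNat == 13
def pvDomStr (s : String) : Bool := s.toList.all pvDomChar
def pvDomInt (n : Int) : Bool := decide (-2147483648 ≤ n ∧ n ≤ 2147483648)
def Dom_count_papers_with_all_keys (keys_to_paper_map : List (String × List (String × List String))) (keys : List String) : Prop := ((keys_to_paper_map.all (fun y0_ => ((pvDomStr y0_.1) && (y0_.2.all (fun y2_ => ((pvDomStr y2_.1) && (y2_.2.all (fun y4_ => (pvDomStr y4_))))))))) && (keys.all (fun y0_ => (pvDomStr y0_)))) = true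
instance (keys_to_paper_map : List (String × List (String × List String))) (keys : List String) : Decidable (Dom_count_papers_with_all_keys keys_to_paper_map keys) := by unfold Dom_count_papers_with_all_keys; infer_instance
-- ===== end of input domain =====

-- B drops A's mutable running-intersection set: it precomputes the later subdicts once, counts the
-- distinct candidate papers that pass a membership test over all later keys, and assembles the result
-- as a filtering comprehension instead of conditional dict insertion (objective: alternative).

-- ===== PORT A =====
-- keys_to_paper_map.get(key, {}).get(subkey, []) as A writes it inside the inner loop
def pvLookA (keys_to_paper_map : List (String × List (String × List String))) (key subkey : String) : List String :=
  PySem.Dict.getD (PySem.Dict.ofList ((PySem.Dict.ofList keys_to_paper_map).getD key [])) subkey []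

def count_papers_with_all_keys (keys_to_paper_map : List (String × List (String × List String))) (keys : List String) : List (String × Int) :=
  match keys with
  | [] => ([] : List (String × Int))
  | first :: rest =>
    ((PySem.Dict.ofList ((PySem.Dict.ofList keys_to_paper_map).getD first [])).items.foldl
      (fun (acc : PySem.Dict String Int) (e : String × List String) =>
        -- intersected_papers = set(papers); intersection_update with each later key's list
        let inter : PySem.Set String :=
          rest.foldl (fun (s : PySem.Set String) key => PySem.Set.inter s (pvLookA keys_to_paper_map key e.1))
            (PySem.Set.ofList e.2)
        let paper_count : Int := PySem.Set.len inter
        if paper_count > 0 then acc.insert e.1 paper_count else acc)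
      PySem.Dict.empty).items

-- ===== PORT B =====
def count_papers_with_all_keys_alt (keys_to_paper_map : List (String × List (String × List String))) (keys : List String) : List (String × Int) :=
  match keys with
  | [] => ([] : List (String × Int))
  | first :: rest =>
    -- later = [keys_to_paper_map.get(k, {}) for k in keys[1:]]
    let later : List (PySem.Dict String (List String)) :=
      rest.map (fun k => PySem.Dict.ofList ((PySem.Dict.ofList keys_to_paper_map).getD k []))
    -- survivors(sk, papers) = sum(1 for p in set(papers) if all(p in m.get(sk, []) for m in later))
    let survivors : String → List String → Int := fun sk papers =>
      (((PySem.Set.ofList papers).countP (fun p => later.all (fun m => (m.getD sk []).contains p)) : Nat) : Int)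
    -- {sk: c for sk, c in counts if c > 0}  over the first key's items
    (PySem.Dict.ofList ((PySem.Dict.ofList keys_to_paper_map).getD first [])).items.filterMap
      (fun e => let c := survivors e.1 e.2; if c > 0 then some (e.1, c) else none)

-- ===== PRECONDITION & SPEC =====
def Spec_count_papers_with_all_keys (keys_to_paper_map : List (String × List (String × List String))) (keys : List String) (out : List (String × Int)) : Prop := out = count_papers_with_all_keys_alt keys_to_paper_map keys
instance (keys_to_paper_map : List (String × List (String × List String))) (keys : List String) (out : List (String × Int)) : Decidable (Spec_count_papers_with_all_keys keys_to_paper_map keys out) := by unfold Spec_count_papers_with_all_keys; infer_instance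

-- ===== CLAIM (what is proved, stated in full; the proofs are below) =====
def Claim_equal_count_papers_with_all_keys : Prop := ∀ (keys_to_paper_map : List (String × List (String × List String))) (keys : List String), Dom_count_papers_with_all_keys keys_to_paper_map keys → Spec_count_papers_with_all_keys keys_to_paper_map keys (count_papers_with_all_keys keys_to_paper_map keys)

-- ===== LEMMAS AND PROOFS =====

-- A's intersection_update loop is one filter by membership in every later key's list
theorem pv_foldl_inter (ks : List String) (t : String → List String) (s : List String) :
    ks.foldl (fun (s : PySem.Set String) k => PySem.Set.inter s (t k)) s
      = s.filter (fun p => ks.all (fun k => (t k).contains p)) := by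
  induction ks generalizing s with
  | nil => simp
  | cons k ks ih =>
    rw [List.foldl_cons, ih]
    simp only [PySem.Set.inter, List.filter_filter, List.all_cons]
    apply List.filter_congr
    intro a _
    simp [Bool.and_comm]

-- A's conditional-insert loop over fresh distinct keys collects exactly the filterMap of its body
theorem pv_foldl_cond_insert (l : List (String × List String)) (d : PySem.Dict String Int)
    (f : String × List String → Int)
    (hfresh : ∀ e ∈ l, d.contains e.1 = false) (hnd : (l.map (·.1)).Nodup) :
    (l.foldl (fun (acc : PySem.Dict String Int) e =>
        if f e > 0 then acc.insert e.1 (f e) else acc) d).items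
      = d.items ++ l.filterMap (fun e => if f e > 0 then some (e.1, f e) else none) := by
  induction l generalizing d with
  | nil => simp
  | cons e l ih =>
    rw [List.foldl_cons]
    have hmap := hnd
    rw [List.map_cons, List.nodup_cons] at hmap
    by_cases hf : f e > 0
    · rw [if_pos hf]
      have hfresh' : ∀ e' ∈ l, (d.insert e.1 (f e)).contains e'.1 = false := by
        intro e' he'
        rw [PySem.Dict.contains_insert]
        have hne : e'.1 ≠ e.1 := by
          intro h; exact hmap.1 (h ▸ List.mem_map_of_mem he')
        simp [hne, hfresh e' (List.mem_cons_of_mem _ he')]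
      rw [ih _ hfresh' hmap.2]
      rw [PySem.Dict.items_insert_of_not_contains d (f e) (hfresh e List.mem_cons_self)]
      simp [hf]
    · rw [if_neg hf]
      rw [ih _ (fun e' he' => hfresh e' (List.mem_cons_of_mem _ he')) hmap.2]
      simp [hf]

-- per subkey: A's intersection size equals B's surviving-candidate count
theorem pv_per_entry (m : List (String × List (String × List String))) (sk : String)
    (papers : List String) (rest : List String) :
    PySem.Set.len (rest.foldl (fun (s : PySem.Set String) key => PySem.Set.inter s (pvLookA m key sk))
        (PySem.Set.ofList papers))
      = (((PySem.Set.ofList papers).countP (fun p =>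
            (rest.map (fun k => PySem.Dict.ofList ((PySem.Dict.ofList m).getD k []))).all
              (fun d => (d.getD sk []).contains p)) : Nat) : Int) := by
  rw [pv_foldl_inter]
  simp [PySem.Set.len, List.countP_eq_length_filter, List.all_map, Function.comp_def, pvLookA]

theorem pv_main_eq (m : List (String × List (String × List String))) (keys : List String) :
    count_papers_with_all_keys m keys = count_papers_with_all_keys_alt m keys := by
  cases keys with
  | nil => rfl
  | cons first rest =>
    unfold count_papers_with_all_keys count_papers_with_all_keys_alt
    dsimp only
    rw [pv_foldl_cond_insert _ _ _
        (fun e _ => PySem.Dict.contains_empty e.1)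
        (by
          have := PySem.Dict.nodup_keys_ofList ((PySem.Dict.ofList m).getD first [])
          simpa [PySem.Dict.keys] using this)]
    rw [show (PySem.Dict.empty : PySem.Dict String Int).items = [] from rfl, List.nil_append]
    apply List.filterMap_congr
    intro e _
    rw [pv_per_entry m e.1 e.2 rest]

-- ===== VERDICT (by name: the statement is the Claim_ definition above) =====
theorem count_papers_with_all_keys_spec : Claim_equal_count_papers_with_all_keys := by
  intro m keys _
  unfold Spec_count_papers_with_all_keys
  exact pv_main_eq m keys
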